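-- pv_equiv track=rewrite | github.com/yashwalker7/GFG-POTD | GFG/Delete middle element of a stack.py | deleteMid
-- ===== SOURCE A (Python) =====
-- def deleteMid(s, sizeOfStack):
--     # code here
--     stack = []
--     count=sizeOfStack//2
--     for i in range(count):
--         e=s.pop()
--         stack.append(e)
--     s.pop()
--     while stack:
--         i=stack.pop()
--         s.append(i)
--
--     return s
-- ===== SOURCE B (Python) =====
-- def deleteMid(s, sizeOfStack):
--     # one indexed deletion instead of pop/restore loops; mutates s in place like A
--     del s[-(sizeOfStack // 2) - 1]
--     return s
-- ===== Notes on version B (the rewrite author's own statement) =====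
-- stated objective: simpler
-- what changed: Replaces the auxiliary stack and the two pop/restore loops by a single closed-form indexed deletion del s[-(sizeOfStack//2)-1].
-- outside the precondition, e.g. on deleteMid([1, 2, 3], -2): A returns [1, 2], B returns [2, 3]
import Mathlib
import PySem

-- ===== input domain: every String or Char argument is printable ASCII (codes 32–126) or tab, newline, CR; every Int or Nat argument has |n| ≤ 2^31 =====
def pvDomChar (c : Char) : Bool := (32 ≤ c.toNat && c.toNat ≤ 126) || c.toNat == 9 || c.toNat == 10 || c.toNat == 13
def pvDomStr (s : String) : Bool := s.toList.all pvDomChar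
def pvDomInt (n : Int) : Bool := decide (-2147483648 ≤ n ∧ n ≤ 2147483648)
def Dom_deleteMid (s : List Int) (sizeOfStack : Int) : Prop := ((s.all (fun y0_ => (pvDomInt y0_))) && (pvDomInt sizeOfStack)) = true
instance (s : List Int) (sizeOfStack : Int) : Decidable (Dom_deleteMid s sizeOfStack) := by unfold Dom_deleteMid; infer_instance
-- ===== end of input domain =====

-- B replaces A's auxiliary stack and two pop/restore loops by one indexed deletion (simpler);
-- both Pythons mutate s in place identically; equivalence here is about the return value.

-- ===== PORT A =====
-- 'for i in range(count): e = s.pop(); stack.append(e)' — s.pop() on [] raises IndexError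
-- (excluded by Pre_); the 'none' branch is unreachable under Pre_.
def popPushLoop : Nat → List Int → List Int → List Int × List Int
  | 0, s, stack => (s, stack)
  | n + 1, s, stack =>
      match PySem.List.pop? s with
      | some (e, s') => popPushLoop n s' (stack ++ [e])
      | none => (s, stack)

-- 'while stack: i = stack.pop(); s.append(i)'
def restoreLoop (s : List Int) (stack : List Int) : List Int :=
  if h : stack = [] then s
  else restoreLoop (s ++ [stack.getLast h]) stack.dropLast
termination_by stack.length
decreasing_by
  cases stack with
  | nil => exact absurd rfl h
  | cons a l => simp [List.length_dropLast]

def deleteMid (s : List Int) (sizeOfStack : Int) : List Int :=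
  let count := PySem.Int.floordiv sizeOfStack 2
  match popPushLoop count.toNat s [] with
  | (s1, stack) =>
    -- 's.pop()' — raises on empty s (excluded by Pre_)
    let s2 := match PySem.List.pop? s1 with
      | some (_, s') => s'
      | none => s1
    restoreLoop s2 stack

-- ===== PORT B =====
-- 'del s[-(sizeOfStack // 2) - 1]': a negative index is offset by len(s); an out-of-range
-- index raises IndexError (excluded by Pre_; left as s here).
def deleteMid_alt (s : List Int) (sizeOfStack : Int) : List Int :=
  let idx := -(PySem.Int.floordiv sizeOfStack 2) - 1
  let j := if idx < 0 then idx + s.length else idx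
  if 0 ≤ j ∧ j < s.length then s.take j.toNat ++ s.drop (j.toNat + 1) else s

-- ===== PRECONDITION & SPEC =====
-- Pre_ excludes (a) inputs where A raises IndexError (sizeOfStack//2 + 1 pops exceed len(s))
-- and (b) negative sizeOfStack, which contradicts the contract that sizeOfStack is the stack's
-- size: no behaviour is specified there and A's (delete the last element) and B's (delete an
-- element indexed from the front, or IndexError) are equally arbitrary.
def Pre_deleteMid (s : List Int) (sizeOfStack : Int) : Prop :=
  0 ≤ sizeOfStack ∧ PySem.Int.floordiv sizeOfStack 2 + 1 ≤ s.length
instance (s : List Int) (sizeOfStack : Int) : Decidable (Pre_deleteMid s sizeOfStack) := by unfold Pre_deleteMid; infer_instance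
def pvWitness_deleteMid : List Int × Int := ([1, 2, 3, 4, 5], 5)
def Spec_deleteMid (s : List Int) (sizeOfStack : Int) (out : List Int) : Prop := out = deleteMid_alt s sizeOfStack
instance (s : List Int) (sizeOfStack : Int) (out : List Int) : Decidable (Spec_deleteMid s sizeOfStack out) := by unfold Spec_deleteMid; infer_instance

-- ===== CLAIM (what is proved, stated in full; the proofs are below) =====
def Claim_equal_deleteMid : Prop := ∀ (s : List Int) (sizeOfStack : Int), Dom_deleteMid s sizeOfStack → Pre_deleteMid s sizeOfStack → Spec_deleteMid s sizeOfStack (deleteMid s sizeOfStack)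

-- ===== LEMMAS AND PROOFS =====

theorem restoreLoop_eq (stack : List Int) : ∀ (s : List Int),
    restoreLoop s stack = s ++ stack.reverse := by
  induction stack using List.reverseRecOn with
  | nil => intro s; rw [restoreLoop]; simp
  | append_singleton xs x ih =>
      intro s
      rw [restoreLoop]
      have hne : xs ++ [x] ≠ [] := by simp
      rw [dif_neg hne]
      simp only [List.getLast_concat, List.dropLast_concat]
      rw [ih]
      simp

theorem popPushLoop_eq : ∀ (c : Nat) (s stack : List Int), c ≤ s.length →
    popPushLoop c s stack =
      (s.take (s.length - c), stack ++ (s.drop (s.length - c)).reverse) := by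
  intro c
  induction c with
  | zero => intro s stack _; simp [popPushLoop]
  | succ n ih =>
      intro s stack hc
      cases s using List.reverseRecOn with
      | nil => simp at hc
      | append_singleton xs x =>
          have hn : n ≤ xs.length := by simp at hc; omega
          simp only [popPushLoop, PySem.List.pop?_last]
          rw [ih xs (stack ++ [x]) hn]
          have h1 : (xs ++ [x]).length - (n + 1) = xs.length - n := by simp
          rw [h1, List.take_append_of_le_length (by omega),
              List.drop_append_of_le_length (by omega)]
          simp

-- ===== VERDICT (by name: the statement is the Claim_ definition above) =====
theorem deleteMid_spec : Claim_equal_deleteMid := by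
  intro s z _ hpre
  obtain ⟨hz, hlen⟩ := hpre
  unfold Spec_deleteMid deleteMid deleteMid_alt
  dsimp only
  set c : Int := PySem.Int.floordiv z 2 with hc
  have hc0 : 0 ≤ c := by
    rw [hc, PySem.Int.floordiv_eq_ediv_of_pos (by omega)]; positivity
  have hcn : c.toNat + 1 ≤ s.length := by omega
  rw [popPushLoop_eq c.toNat s [] (by omega)]
  dsimp only
  -- the inner s.pop(): s.take (s.length - c.toNat) is nonempty
  obtain ⟨ys, y, hys⟩ : ∃ ys y, s.take (s.length - c.toNat) = ys ++ [y] := by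
    rcases List.eq_nil_or_concat (s.take (s.length - c.toNat)) with h | ⟨ys, y, h⟩
    · exfalso
      have := congrArg List.length h
      simp at this
      omega
    · exact ⟨ys, y, by simpa using h⟩
  have hys' : ys = s.take (s.length - c.toNat - 1) := by
    have h1 : ys = (s.take (s.length - c.toNat)).dropLast := by rw [hys]; simp
    rw [h1, List.dropLast_eq_take, List.take_take, List.length_take]
    congr 1
    omega
  rw [hys, PySem.List.pop?_last]
  simp only
  rw [restoreLoop_eq]
  simp only [List.nil_append, List.reverse_reverse]
  -- B's side
  rw [if_pos (show -c - 1 < 0 by omega),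
      if_pos (show (0:Int) ≤ -c - 1 + (s.length:Int) ∧ -c - 1 + (s.length:Int) < (s.length:Int) by
        constructor <;> omega)]
  have hjt : (-c - 1 + (s.length : Int)).toNat = s.length - c.toNat - 1 := by omega
  rw [hjt, hys']
  have hd : s.length - c.toNat - 1 + 1 = s.length - c.toNat := by omega
  rw [hd]
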